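-- pv_equiv track=rewrite | github.com/gavinmichelsen/milo-bot | coaching/training.py | _find_latest_repeated_exercise
-- ===== SOURCE A (Python) =====
-- def _find_latest_repeated_exercise(history: list[dict]) -> tuple[dict, dict] | None:
--     if len(history) < 2:
--         return None
--     by_exercise = {}
--     for workout in history:
--         exercise = (workout.get("exercise") or "").lower()
--         if not exercise:
--             continue
--         by_exercise.setdefault(exercise, []).append(workout)
--     for workouts in by_exercise.values():
--         if len(workouts) >= 2:
--             return workouts[0], workouts[1]
--     return None
-- ===== SOURCE B (Python) =====
-- def _find_latest_repeated_exercise(history: list[dict]) -> tuple[dict, dict] | None: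
--     counts = {}
--     for workout in history:
--         name = (workout.get("exercise") or "").lower()
--         if name:
--             counts[name] = counts.get(name, 0) + 1
--     for i, workout in enumerate(history):
--         name = (workout.get("exercise") or "").lower()
--         if name and counts[name] >= 2:
--             for later in history[i + 1:]:
--                 if (later.get("exercise") or "").lower() == name:
--                     return workout, later
--     return None
-- ===== Notes on version B (the rewrite author's own statement) =====
-- stated objective: alternative
-- what changed: Replaces A's dict-of-lists grouping plus a scan over dict values by a count pass followed by a direct scan of the history for the first workout whose (lowercased, non-empty) exercise occurs at least twice, then a forward scan for its next occurrence.
import Mathlib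
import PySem

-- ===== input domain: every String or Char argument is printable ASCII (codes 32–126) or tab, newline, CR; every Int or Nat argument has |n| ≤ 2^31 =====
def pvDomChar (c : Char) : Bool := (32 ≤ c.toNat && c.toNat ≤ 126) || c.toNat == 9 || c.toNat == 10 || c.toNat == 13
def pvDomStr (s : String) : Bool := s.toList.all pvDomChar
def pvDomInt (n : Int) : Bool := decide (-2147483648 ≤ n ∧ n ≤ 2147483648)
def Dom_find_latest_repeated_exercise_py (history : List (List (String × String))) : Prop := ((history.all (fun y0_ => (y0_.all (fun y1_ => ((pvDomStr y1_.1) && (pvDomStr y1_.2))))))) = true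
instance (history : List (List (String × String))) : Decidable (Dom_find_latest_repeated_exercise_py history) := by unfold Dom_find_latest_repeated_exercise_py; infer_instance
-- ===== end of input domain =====

-- B replaces A's dict-of-lists grouping (then a scan over its values) by a count pass plus a
-- direct scan of the history for the first repeated exercise and its next occurrence
-- (objective: alternative decomposition, same cost).

-- shared by both ports: exercise = (workout.get("exercise") or "").lower()
def pvKey (w : List (String × String)) : String :=
  PySem.Str.lower (((PySem.Dict.mk w).get? "exercise").getD "")

-- ===== PORT A =====

-- 'for workouts in by_exercise.values(): if len(workouts) >= 2: return workouts[0], workouts[1]'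
-- (iterated over the items list, reading the value component)
def pvLoopA : List (String × List (List (String × String))) → Option ((List (String × String)) × (List (String × String)))
  | [] => none
  | (_, ws) :: rest =>
    match ws with
    | w0 :: w1 :: _ => some (w0, w1)
    | _ => pvLoopA rest

def find_latest_repeated_exercise_py (history : List (List (String × String))) : Option ((List (String × String)) × (List (String × String))) :=
  if history.length < 2 then none
  else
    -- by_exercise.setdefault(exercise, []).append(workout)  =  modify with append
    let by_exercise : PySem.Dict String (List (List (String × String))) :=
      history.foldl (fun d w =>
        let ex := pvKey w
        if ex = "" then d
        else d.modify ex [] (fun ws => ws ++ [w])) PySem.Dict.empty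
    pvLoopA by_exercise.items

-- ===== PORT B =====
-- 'for later in history[i+1:]: if key(later) == name: return workout, later'
def pvNextB (name : String) : List (List (String × String)) → Option (List (String × String))
  | [] => none
  | w :: rest => if pvKey w = name then some w else pvNextB name rest

def pvScanB (counts : PySem.Dict String Int) : List (List (String × String)) → Option ((List (String × String)) × (List (String × String)))
  | [] => none
  | w :: rest =>
    let name := pvKey w
    if name ≠ "" ∧ 2 ≤ counts.getD name 0 then
      match pvNextB name rest with
      | some later => some (w, later)
      | none => pvScanB counts rest
    else pvScanB counts rest

def find_latest_repeated_exercise_py_alt (history : List (List (String × String))) : Option ((List (String × String)) × (List (String × String))) :=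
  let counts : PySem.Dict String Int :=
    history.foldl (fun d w =>
      let name := pvKey w
      if name = "" then d
      else d.insert name (d.getD name 0 + 1)) PySem.Dict.empty
  pvScanB counts history

-- ===== PRECONDITION & SPEC =====
def Spec_find_latest_repeated_exercise_py (history : List (List (String × String))) (out : Option ((List (String × String)) × (List (String × String)))) : Prop := out = find_latest_repeated_exercise_py_alt history
instance (history : List (List (String × String))) (out : Option ((List (String × String)) × (List (String × String)))) : Decidable (Spec_find_latest_repeated_exercise_py history out) := by unfold Spec_find_latest_repeated_exercise_py; infer_instance

-- ===== CLAIM (what is proved, stated in full; the proofs are below) =====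
def Claim_equal_find_latest_repeated_exercise_py : Prop := ∀ (history : List (List (String × String))), Dom_find_latest_repeated_exercise_py history → Spec_find_latest_repeated_exercise_py history (find_latest_repeated_exercise_py history)

-- ===== LEMMAS AND PROOFS =====

-- the reference scan both sides are reduced to: first workout with a nonempty key that
-- reappears later, paired with its next occurrence
def pvSpecAux : List (List (String × String)) → Option ((List (String × String)) × (List (String × String)))
  | [] => none
  | w :: rest =>
    if pvKey w = "" then pvSpecAux rest
    else
      match pvNextB (pvKey w) rest with
      | some later => some (w, later)
      | none => pvSpecAux rest

theorem pvNextB_eq_head (name : String) : ∀ (l : List (List (String × String))),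
    pvNextB name l = (l.filter (fun w => pvKey w == name)).head?
  | [] => rfl
  | w :: rest => by
    by_cases h : pvKey w = name <;>
      simp [pvNextB, h, pvNextB_eq_head name rest]

theorem pvSpecAux_short (h : List (List (String × String))) (hlen : h.length < 2) :
    pvSpecAux h = none := by
  match h, hlen with
  | [], _ => rfl
  | [w], _ => by_cases hk : pvKey w = "" <;> simp [pvSpecAux, pvNextB, hk]

theorem pvLoopA_skip (p : String → Bool) (v : String → List (List (String × String))) :
    ∀ (ks : List String), (∀ k ∈ ks, p k = false → (v k).length ≤ 1) →
    pvLoopA ((ks.filter p).map (fun k => (k, v k))) = pvLoopA (ks.map (fun k => (k, v k)))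
  | [], _ => rfl
  | k :: t, hp => by
    have ht : ∀ k' ∈ t, p k' = false → (v k').length ≤ 1 := fun k' hk' => hp k' (by simp [hk'])
    by_cases hpk : p k = true
    · simp only [List.filter_cons, hpk, if_pos, List.map_cons]
      show pvLoopA ((k, v k) :: (t.filter p).map _) = pvLoopA ((k, v k) :: t.map _)
      cases hv : v k with
      | nil => simpa [pvLoopA, hv] using pvLoopA_skip p v t ht
      | cons a tl =>
        cases tl with
        | nil => simpa [pvLoopA, hv] using pvLoopA_skip p v t ht
        | cons b tl2 => simp [pvLoopA]
    · have hpk' : p k = false := by simpa using hpk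
      have hlen := hp k (by simp) hpk'
      simp only [List.filter_cons, hpk', List.map_cons]
      rw [if_neg (by simp)]
      cases hv : v k with
      | nil => simpa [pvLoopA, hv] using pvLoopA_skip p v t ht
      | cons a tl =>
        cases tl with
        | nil => simpa [pvLoopA, hv] using pvLoopA_skip p v t ht
        | cons b tl2 => simp [hv] at hlen

theorem pvScanB_eq (counts : PySem.Dict String Int) :
    ∀ (l : List (List (String × String))),
    (∀ k, k ≠ "" → ((l.filter (fun w => pvKey w == k)).length : Int) ≤ counts.getD k 0) →
    pvScanB counts l = pvSpecAux l
  | [], _ => rfl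
  | w :: rest, hc => by
    have hrest : ∀ k, k ≠ "" → ((rest.filter (fun w => pvKey w == k)).length : Int) ≤ counts.getD k 0 := by
      intro k hk
      refine le_trans ?_ (hc k hk)
      by_cases h : pvKey w = k <;> simp [h]
    by_cases hk0 : pvKey w = ""
    · simp [pvScanB, pvSpecAux, hk0, pvScanB_eq counts rest hrest]
    · by_cases h2 : (2 : Int) ≤ counts.getD (pvKey w) 0
      · have hguard : pvKey w ≠ "" ∧ (2 : Int) ≤ counts.getD (pvKey w) 0 := ⟨hk0, h2⟩
        simp only [pvScanB, pvSpecAux]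
        rw [if_pos hguard, if_neg hk0]
        cases e : pvNextB (pvKey w) rest with
        | some later => rfl
        | none => exact pvScanB_eq counts rest hrest
      · have hcnt := hc (pvKey w) hk0
        rw [List.filter_cons, if_pos (by simp)] at hcnt
        have hz : (rest.filter (fun w' => pvKey w' == pvKey w)).length = 0 := by
          simp only [List.length_cons] at hcnt; omega
        have hnone : pvNextB (pvKey w) rest = none := by
          rw [pvNextB_eq_head]
          rw [List.length_eq_zero_iff] at hz
          simp [hz]
        simp [pvScanB, pvSpecAux, hk0, h2, hnone, pvScanB_eq counts rest hrest]

theorem pvFoldl_skip {δ : Type} (f : δ → (List (String × String)) → δ) :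
    ∀ (l : List (List (String × String))) (init : δ),
    l.foldl (fun d w => if pvKey w = "" then d else f d w) init =
      (l.filter (fun w => !(pvKey w == ""))).foldl f init
  | [], _ => rfl
  | w :: rest, init => by
    by_cases h : pvKey w = "" <;>
      simp [h, pvFoldl_skip f rest]

theorem pvCounts_getD (h : List (List (String × String))) (k : String) :
    (h.foldl (fun d w => if pvKey w = "" then d else d.insert (pvKey w) (d.getD (pvKey w) 0 + 1)) PySem.Dict.empty).getD k 0
      = (((h.filter (fun w => !(pvKey w == ""))).map pvKey).count k : Int) := by
  rw [pvFoldl_skip, ← List.foldl_map (f := pvKey)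
    (g := fun d x => PySem.Dict.insert d x (d.getD x 0 + 1)),
    PySem.Dict.getD_foldl_insert_add_one, PySem.Dict.getD_empty]
  simp [List.count_eq_length_filter]

theorem pvCount_eq_filter (h : List (List (String × String))) (k : String) (hk : k ≠ "") :
    ((h.filter (fun w => !(pvKey w == ""))).map pvKey).count k
      = (h.filter (fun w => pvKey w == k)).length := by
  rw [List.count_eq_length_filter, List.filter_map, List.length_map, List.filter_filter]
  congr 1
  refine List.filter_congr fun w _ => ?_
  by_cases hw : pvKey w = k
  · simp [Function.comp, hw, hk]
  · simp [Function.comp, hw]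

theorem pvOfList_cons (x : String) (xs : List String) :
    PySem.Set.ofList (x :: xs) = x :: (PySem.Set.ofList xs).filter (fun y => !(y == x)) := by
  show PySem.Set.update (PySem.Set.add PySem.Set.empty x) xs = _
  have hadd : PySem.Set.add PySem.Set.empty x = [x] := rfl
  rw [hadd, PySem.Set.update_eq_append_filter]
  simp only [List.singleton_append, List.cons.injEq, true_and]
  refine List.filter_congr fun y _ => ?_
  show (!List.contains [x] y) = _
  simp [beq_eq_decide]

theorem pvKey_nonempty_of_mem (h : List (List (String × String))) (k : String)
    (hk : k ∈ PySem.Set.ofList ((h.filter (fun w => !(pvKey w == ""))).map pvKey)) : k ≠ "" := by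
  rw [PySem.Set.mem_ofList] at hk
  obtain ⟨w, hw, hkw⟩ := List.mem_map.mp hk
  have := (List.mem_filter.mp hw).2
  simp only [Bool.not_eq_eq_eq_not, Bool.not_true, beq_eq_false_iff_ne] at this
  exact hkw ▸ this

theorem pvBuild_items (h : List (List (String × String))) :
    (h.foldl (fun d w => if pvKey w = "" then d else d.modify (pvKey w) [] (fun ws => ws ++ [w])) PySem.Dict.empty).items
      = (PySem.Set.ofList ((h.filter (fun w => !(pvKey w == ""))).map pvKey)).map
          (fun k => (k, h.filter (fun w => pvKey w == k))) := by
  rw [pvFoldl_skip]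
  set hf := h.filter (fun w => !(pvKey w == "")) with hhf
  have hnodup : (hf.foldl (fun d w => d.modify (pvKey w) [] (fun ws => ws ++ [w])) PySem.Dict.empty).keys.Nodup := by
    apply PySem.Dict.nodup_keys_foldl_modify_key hf pvKey [] (fun _ w ws => ws ++ [w])
    simp [PySem.Dict.keys_empty]
  have hkeys : (hf.foldl (fun d w => d.modify (pvKey w) [] (fun ws => ws ++ [w])) PySem.Dict.empty).keys
      = PySem.Set.ofList (hf.map pvKey) := by
    rw [PySem.Dict.keys_foldl_modify_key hf pvKey [] (fun _ w ws => ws ++ [w])]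
    rw [PySem.Dict.keys_empty]
    rfl
  have hgetD : ∀ k, (hf.foldl (fun d w => d.modify (pvKey w) [] (fun ws => ws ++ [w])) PySem.Dict.empty).getD k []
      = hf.filter (fun w => pvKey w == k) := by
    intro k
    have hfold : (hf.foldl (fun d w => d.modify (pvKey w) [] (fun ws => ws ++ [w])) PySem.Dict.empty).getD k []
        = ((hf.map (fun w => (pvKey w, w))).foldl
            (fun (d : PySem.Dict String (List (List (String × String)))) p =>
              d.modify p.1 [] (fun ws => ws ++ [p.2])) PySem.Dict.empty).getD k [] := by
      rw [List.foldl_map]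
    rw [hfold, PySem.Dict.getD_foldl_modify_append, PySem.Dict.getD_empty]
    simp [List.filter_map, List.map_map, Function.comp_def]
  rw [PySem.Dict.items_eq_map_keys _ hnodup [], hkeys]
  refine List.map_congr_left fun k hk => ?_
  have hkne : k ≠ "" := pvKey_nonempty_of_mem h k (by rw [hhf] at hk; exact hk)
  rw [hgetD k]
  congr 1
  rw [hhf, List.filter_filter]
  refine List.filter_congr fun w _ => ?_
  by_cases hw : pvKey w = k
  · simp [hw, hkne]
  · simp [hw]

theorem pvLoopA_eq_specAux : ∀ (h : List (List (String × String))),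
    pvLoopA ((PySem.Set.ofList ((h.filter (fun w => !(pvKey w == ""))).map pvKey)).map
      (fun k => (k, h.filter (fun w => pvKey w == k)))) = pvSpecAux h
  | [] => rfl
  | w :: rest => by
    by_cases hk0 : pvKey w = ""
    · rw [List.filter_cons, if_neg (by simp [hk0])]
      have hmap : (PySem.Set.ofList ((rest.filter (fun w' => !(pvKey w' == ""))).map pvKey)).map
            (fun k => (k, (w :: rest).filter (fun w' => pvKey w' == k)))
          = (PySem.Set.ofList ((rest.filter (fun w' => !(pvKey w' == ""))).map pvKey)).map
            (fun k => (k, rest.filter (fun w' => pvKey w' == k))) := by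
        refine List.map_congr_left fun k hk => ?_
        have hkne : k ≠ "" := pvKey_nonempty_of_mem rest k hk
        rw [List.filter_cons, if_neg (by simp [hk0]; exact hkne)]
      rw [hmap, pvLoopA_eq_specAux rest]
      simp [pvSpecAux, hk0]
    · rw [List.filter_cons, if_pos (by simp [hk0]), List.map_cons, pvOfList_cons, List.map_cons]
      rw [List.filter_cons (x := w) (xs := rest), if_pos (by simp)]
      cases hv : rest.filter (fun w' => pvKey w' == pvKey w) with
      | cons w2 tl =>
        have hnext : pvNextB (pvKey w) rest = some w2 := by
          rw [pvNextB_eq_head, hv]; rfl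
        simp [pvLoopA, pvSpecAux, hk0, hnext]
      | nil =>
        show pvLoopA ((pvKey w, [w]) :: _) = _
        have hstep : pvLoopA ((pvKey w, [w]) ::
            ((PySem.Set.ofList ((rest.filter (fun w' => !(pvKey w' == ""))).map pvKey)).filter
              (fun y => !(y == pvKey w))).map
              (fun k => (k, (w :: rest).filter (fun w' => pvKey w' == k))))
            = pvLoopA (((PySem.Set.ofList ((rest.filter (fun w' => !(pvKey w' == ""))).map pvKey)).filter
              (fun y => !(y == pvKey w))).map
              (fun k => (k, (w :: rest).filter (fun w' => pvKey w' == k)))) := by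
          simp [pvLoopA]
        rw [hstep]
        have hmap : ((PySem.Set.ofList ((rest.filter (fun w' => !(pvKey w' == ""))).map pvKey)).filter
              (fun y => !(y == pvKey w))).map
              (fun k => (k, (w :: rest).filter (fun w' => pvKey w' == k)))
            = ((PySem.Set.ofList ((rest.filter (fun w' => !(pvKey w' == ""))).map pvKey)).filter
              (fun y => !(y == pvKey w))).map
              (fun k => (k, rest.filter (fun w' => pvKey w' == k))) := by
          refine List.map_congr_left fun k hk => ?_
          have hkne : k ≠ pvKey w := by
            have := (List.mem_filter.mp hk).2
            simpa using this
          rw [List.filter_cons, if_neg (by simp; exact Ne.symm hkne)]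
        rw [hmap]
        rw [pvLoopA_skip (fun y => !(y == pvKey w)) (fun k => rest.filter (fun w' => pvKey w' == k))
          (PySem.Set.ofList ((rest.filter (fun w' => !(pvKey w' == ""))).map pvKey))
          (fun k _ hpk => by
            have hkeq : k = pvKey w := by simpa using hpk
            simp [hkeq, hv])]
        rw [pvLoopA_eq_specAux rest]
        have hnext : pvNextB (pvKey w) rest = none := by
          rw [pvNextB_eq_head, hv]; rfl
        simp [pvSpecAux, hk0, hnext]

theorem pvAlt_eq_specAux (h : List (List (String × String))) :
    find_latest_repeated_exercise_py_alt h = pvSpecAux h := by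
  show pvScanB _ h = pvSpecAux h
  refine pvScanB_eq _ h fun k hk => ?_
  rw [pvCounts_getD, pvCount_eq_filter h k hk]

-- ===== VERDICT (by name: the statement is the Claim_ definition above) =====
theorem find_latest_repeated_exercise_py_spec : Claim_equal_find_latest_repeated_exercise_py := by
  intro history _
  show find_latest_repeated_exercise_py history = find_latest_repeated_exercise_py_alt history
  rw [pvAlt_eq_specAux]
  by_cases hlen : history.length < 2
  · rw [find_latest_repeated_exercise_py, if_pos hlen, pvSpecAux_short history hlen]
  · rw [find_latest_repeated_exercise_py, if_neg hlen]
    show pvLoopA (List.foldl _ PySem.Dict.empty history).items = _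
    rw [show (fun (d : PySem.Dict String (List (List (String × String)))) w =>
        let ex := pvKey w
        if ex = "" then d else d.modify ex [] (fun ws => ws ++ [w]))
      = (fun d w => if pvKey w = "" then d else d.modify (pvKey w) [] (fun ws => ws ++ [w])) from rfl]
    rw [pvBuild_items, pvLoopA_eq_specAux]
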